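-- pv_equiv track=rewrite | github.com/thu-spmi/PARG | filter_eval.py | formalize
-- ===== SOURCE A (Python) =====
-- def formalize(str1):
--     punct = [",", ".", "?", "!", ":", "\"", "\'", "/"]
--     # add space in front of each punctuation
--     for p in punct:
--         f = ""
--         for s in str1.split(p):
--             f = f + s + " " + p
--         str1 = f[:-1]
--     # filter the double space in the sentence
--     f = ""
--     for s in str1.split(" "):
--         if s != "":
--             f = f + s + " "
--     str1 = f[:-1]
--     # change all the characters to the lowercase
--     str1 = str1.lower()
--     return str1
-- ===== SOURCE B (Python) =====
-- def formalize(str1):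
--     punct = {",", ".", "?", "!", ":", "\"", "\'", "/"}
--     out = []
--     need_space = False
--     for c in str1:
--         if c == " ":
--             if out:
--                 need_space = True
--         else:
--             if c in punct and out:
--                 need_space = True
--             if need_space:
--                 out.append(" ")
--                 need_space = False
--             out.append(c)
--     return "".join(out).lower()
-- ===== Notes on version B (the rewrite author's own statement) =====
-- stated objective: alternative
-- what changed: Replaces A's eight split/rebuild passes (one per punctuation mark) plus a separate space-collapse pass with a single left-to-right character scan that maintains an output list and a pending-space flag.
import Mathlib
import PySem

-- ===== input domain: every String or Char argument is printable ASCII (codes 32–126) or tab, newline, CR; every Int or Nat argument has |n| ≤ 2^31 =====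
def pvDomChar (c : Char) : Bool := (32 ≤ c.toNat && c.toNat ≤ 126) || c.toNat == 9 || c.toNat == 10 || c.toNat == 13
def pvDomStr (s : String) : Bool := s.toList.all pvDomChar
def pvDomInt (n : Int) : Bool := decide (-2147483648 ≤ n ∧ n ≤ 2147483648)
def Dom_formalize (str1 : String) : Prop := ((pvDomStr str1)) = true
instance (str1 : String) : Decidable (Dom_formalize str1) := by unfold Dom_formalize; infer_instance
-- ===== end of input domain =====

-- B replaces A's eight split/rebuild passes plus a collapse pass by one left-to-right
-- scan with a pending-space flag (return value only; neither version mutates its argument).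

-- ===== PORT A =====
-- one pass of A's punctuation loop: f = ""; for s in str1.split(p): f = f + s + " " + p; str1 = f[:-1]
def pvPassA (str1 : List Char) (p : List Char) : List Char :=
  PySem.List.slice (List.foldl (fun f s => f ++ s ++ [' '] ++ p) [] (PySem.Chars.splitOn str1 p)) none (some (-1))

-- A's space-collapse pass: f = ""; for s in str1.split(" "): if s != "": f = f + s + " "; str1 = f[:-1]
def pvCollapseA (str1 : List Char) : List Char :=
  PySem.List.slice (List.foldl (fun f s => if s ≠ [] then f ++ s ++ [' '] else f) [] (PySem.Chars.splitOn str1 [' '])) none (some (-1))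

def formalize (str1 : String) : String :=
  let punct : List (List Char) := [[','], ['.'], ['?'], ['!'], [':'], ['"'], ['\''], ['/']]
  String.mk (PySem.Chars.lower (pvCollapseA (List.foldl pvPassA str1.toList punct)))

-- ===== PORT B =====
def pvPunctSet : PySem.Set Char := PySem.Set.ofList [',', '.', '?', '!', ':', '"', '\'', '/']

-- the body of B's for-loop over the characters; state = (out, need_space)
def pvStepB (st : List Char × Bool) (c : Char) : List Char × Bool :=
  if c = ' ' then
    if st.1 ≠ [] then (st.1, true) else st
  else
    let st := if pvPunctSet.contains c && !st.1.isEmpty then (st.1, true) else st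
    let st := if st.2 then (st.1 ++ [' '], false) else st
    (st.1 ++ [c], st.2)

def formalize_alt (str1 : String) : String :=
  String.mk (PySem.Chars.lower (List.foldl pvStepB ([], false) str1.toList).1)

-- ===== PRECONDITION & SPEC =====
def Spec_formalize (str1 : String) (out : String) : Prop := out = formalize_alt str1
instance (str1 : String) (out : String) : Decidable (Spec_formalize str1 out) := by unfold Spec_formalize; infer_instance

-- ===== CLAIM (what is proved, stated in full; the proofs are below) =====
def Claim_equal_formalize : Prop := ∀ (str1 : String), Dom_formalize str1 → Spec_formalize str1 (formalize str1)

-- ===== LEMMAS AND PROOFS =====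

-- the eight punctuation characters, as a plain list
def pvPunct : List Char := [',', '.', '?', '!', ':', '"', '\'', '/']

-- insert a space before every character of S
def pvIns (S : List Char) (cs : List Char) : List Char :=
  cs.flatMap (fun c => if S.contains c then [' ', c] else [c])

-- insert a space before every occurrence of the single character p
def pvInsP (p : Char) (cs : List Char) : List Char :=
  cs.flatMap (fun c => if c = p then [' ', c] else [c])

-- structural version of Python's s.split(p) for a one-character separator
def pvSplit (p : Char) : List Char → List (List Char)
  | [] => [[]]
  | c :: t => if c = p then [] :: pvSplit p t else (pvSplit p t).modifyHead (c :: ·)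

-- join nonempty tokens with single spaces (closed current token)
def pvJoin : List (List Char) → List Char
  | [] => []
  | h :: r => h ++ r.flatMap (fun tk => ' ' :: tk)

def pvJ0 (ts : List (List Char)) : List Char := pvJoin (ts.filter (· ≠ []))

-- pending-space continuation: a space before every further nonempty token
def pvJs (ts : List (List Char)) : List Char :=
  (ts.filter (· ≠ [])).flatMap (fun tk => ' ' :: tk)

-- open-token continuation: head extends the current token
def pvJc : List (List Char) → List Char
  | [] => []
  | h :: r => h ++ pvJs r

-- recursive description of B's scan, output nonempty so far (need = pending space)
def pvScan1 : Bool → List Char → List Char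
  | _, [] => []
  | need, c :: t =>
    if c = ' ' then pvScan1 true t
    else (if need || pvPunctSet.contains c then [' ', c] else [c]) ++ pvScan1 false t

-- recursive description of B's scan from the empty output
def pvScan0 : List Char → List Char
  | [] => []
  | c :: t => if c = ' ' then pvScan0 t else c :: pvScan1 false t

-- token list of the canonical middle form
def pvM (cs : List Char) : List (List Char) := pvSplit ' ' (pvIns pvPunct cs)

theorem pvSplit_ne_nil (p : Char) (l : List Char) : pvSplit p l ≠ [] := by
  induction l with
  | nil => simp [pvSplit]
  | cons c t ih =>
    by_cases h : c = p
    · simp [pvSplit, h]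
    · cases hs : pvSplit p t with
      | nil => exact absurd hs ih
      | cons a b => simp [pvSplit, h, hs]

theorem pvGo_eq (p : Char) (fuel : Nat) (l cur : List Char) (acc : List (List Char))
    (h : l.length ≤ fuel) :
    PySem.Chars.splitOn.go [p] fuel l cur acc
      = acc.reverse ++ (pvSplit p l).modifyHead (cur.reverse ++ ·) := by
  induction fuel generalizing l cur acc with
  | zero =>
    cases l with
    | nil =>
      rw [PySem.Chars.splitOn.go.eq_def]
      simp [pvSplit]
    | cons c rest => simp at h
  | succ fuel ih =>
    cases l with
    | nil =>
      rw [PySem.Chars.splitOn.go.eq_def]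
      simp [pvSplit]
    | cons c rest =>
      rw [PySem.Chars.splitOn.go.eq_def]
      simp only [List.isPrefixOf, Bool.and_true]
      by_cases hc : p = c
      · subst hc
        rw [if_pos (by simp)]
        rw [show List.drop ([p] : List Char).length (p :: rest) = rest from by simp]
        rw [ih rest [] (cur.reverse :: acc) (by simpa using Nat.le_of_succ_le_succ h)]
        cases hs : pvSplit p rest with
        | nil => exact absurd hs (pvSplit_ne_nil p rest)
        | cons a b => simp [pvSplit, hs, List.modifyHead]
      · rw [if_neg (by simp [hc])]
        rw [ih rest (c :: cur) acc (by simpa using Nat.le_of_succ_le_succ h)]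
        cases hs : pvSplit p rest with
        | nil => exact absurd hs (pvSplit_ne_nil p rest)
        | cons a b => simp [pvSplit, Ne.symm hc, hs, List.modifyHead]

theorem pvSplitOn_single (p : Char) (s : List Char) :
    PySem.Chars.splitOn s [p] = pvSplit p s := by
  show PySem.Chars.splitOn.go [p] (s.length + 1) s [] [] = pvSplit p s
  rw [pvGo_eq p (s.length + 1) s [] [] (by omega)]
  cases hs : pvSplit p s with
  | nil => exact absurd hs (pvSplit_ne_nil p s)
  | cons a b => simp

theorem pvFoldl_pass (p : List Char) (ps : List (List Char)) (a : List Char) :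
    List.foldl (fun f s => f ++ s ++ [' '] ++ p) a ps
      = a ++ (ps.map (fun s => s ++ ([' '] ++ p))).flatten := by
  induction ps generalizing a with
  | nil => simp
  | cons h t ih => simp [List.foldl_cons, ih, List.append_assoc]

theorem pvFlatten_split (p : Char) (cs : List Char) :
    ((pvSplit p cs).map (fun s => s ++ [' ', p])).flatten = pvInsP p cs ++ [' ', p] := by
  induction cs with
  | nil => simp [pvSplit, pvInsP]
  | cons c t ih =>
    cases hs : pvSplit p t with
    | nil => exact absurd hs (pvSplit_ne_nil p t)
    | cons a b =>
      rw [hs] at ih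
      by_cases h : c = p
      · subst h
        rw [show pvSplit c (c :: t) = [] :: pvSplit c t from by simp [pvSplit], hs]
        rw [List.map_cons, List.flatten_cons, ih]
        simp [pvInsP]
      · rw [show pvSplit p (c :: t) = (c :: a) :: b from by simp [pvSplit, h, hs]]
        rw [List.map_cons, List.flatten_cons] at ih ⊢
        simp only [pvInsP, List.flatMap_cons, if_neg h] at ih ⊢
        rw [List.cons_append, List.cons_append, ih]
        simp

theorem pvPassA_eq (p : Char) (cs : List Char) :
    pvPassA cs [p] = pvInsP p cs ++ [' '] := by
  unfold pvPassA
  rw [pvSplitOn_single, pvFoldl_pass]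
  show PySem.List.slice ([] ++ ((pvSplit p cs).map (fun s => s ++ [' ', p])).flatten) none
      (some (-1)) = pvInsP p cs ++ [' ']
  rw [pvFlatten_split]
  have h1 : PySem.List.slice ([] ++ (pvInsP p cs ++ [' ', p])) none (some (-1))
      = ((pvInsP p cs ++ [' ']) ++ [p]).dropLast := by simp [pysem]
  rw [h1, List.dropLast_concat]

theorem pvInsP_append (p : Char) (x y : List Char) :
    pvInsP p (x ++ y) = pvInsP p x ++ pvInsP p y := by
  simp [pvInsP]

theorem pvInsP_replicate (p : Char) (hp : p ≠ ' ') (n : Nat) :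
    pvInsP p (List.replicate n ' ') = List.replicate n ' ' := by
  induction n with
  | zero => simp [pvInsP]
  | succ m ih => simp [pvInsP, List.replicate_succ] at ih ⊢; simp [hp.symm, ih]

theorem pvInsP_ins (p : Char) (hp : p ≠ ' ') (S : List Char) (hS : S.contains p = false)
    (cs : List Char) :
    pvInsP p (pvIns S cs) = pvIns (S ++ [p]) cs := by
  induction cs with
  | nil => rfl
  | cons c t ih =>
    rw [show pvIns S (c :: t) = (if S.contains c = true then [' ', c] else [c]) ++ pvIns S t from
      by simp [pvIns]]
    rw [pvInsP_append, ih]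
    rw [show pvIns (S ++ [p]) (c :: t)
        = (if (S ++ [p]).contains c = true then [' ', c] else [c]) ++ pvIns (S ++ [p]) t from
      by simp [pvIns]]
    congr 1
    by_cases hc : c ∈ S
    · have hcp : c ≠ p := by
        rintro rfl; simp [List.contains_eq_mem] at hS; exact hS hc
      simp [pvInsP, List.contains_eq_mem, hc, hcp, Ne.symm hp]
    · by_cases hcp : c = p
      · subst hcp; simp [pvInsP, List.contains_eq_mem, hc]
      · simp [pvInsP, List.contains_eq_mem, hc, hcp]

theorem pvIns_nil (cs : List Char) : pvIns [] cs = cs := by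
  simp [pvIns]

theorem pvPass_step (p : Char) (S : List Char) (hp : p ≠ ' ') (hS : S.contains p = false)
    (n : Nat) (cs : List Char) :
    pvPassA (pvIns S cs ++ List.replicate n ' ') [p]
      = pvIns (S ++ [p]) cs ++ List.replicate (n + 1) ' ' := by
  rw [pvPassA_eq, pvInsP_append, pvInsP_ins p hp S hS, pvInsP_replicate p hp]
  simp [List.replicate_succ', List.append_assoc]

theorem pvLoop_eq (cs : List Char) :
    List.foldl pvPassA cs [[','], ['.'], ['?'], ['!'], [':'], ['"'], ['\''], ['/']]
      = pvIns pvPunct cs ++ List.replicate 8 ' ' := by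
  simp only [List.foldl_cons, List.foldl_nil]
  conv_lhs => rw [show cs = pvIns [] cs ++ List.replicate 0 ' ' from by simp [pvIns_nil]]
  rw [pvPass_step ',' [] (by decide) (by decide),
      pvPass_step '.' ([] ++ [',']) (by decide) (by decide),
      pvPass_step '?' (([] ++ [',']) ++ ['.']) (by decide) (by decide),
      pvPass_step '!' ((([] ++ [',']) ++ ['.']) ++ ['?']) (by decide) (by decide),
      pvPass_step ':' (((([] ++ [',']) ++ ['.']) ++ ['?']) ++ ['!']) (by decide) (by decide),
      pvPass_step '"' ((((([] ++ [',']) ++ ['.']) ++ ['?']) ++ ['!']) ++ [':']) (by decide) (by decide),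
      pvPass_step '\'' (((((([] ++ [',']) ++ ['.']) ++ ['?']) ++ ['!']) ++ [':']) ++ ['"']) (by decide) (by decide),
      pvPass_step '/' ((((((([] ++ [',']) ++ ['.']) ++ ['?']) ++ ['!']) ++ [':']) ++ ['"']) ++ ['\'']) (by decide) (by decide)]
  rfl

theorem pvFoldl_collapse (ts : List (List Char)) (a : List Char) :
    List.foldl (fun f s => if s ≠ [] then f ++ s ++ [' '] else f) a ts
      = a ++ (ts.filter (· ≠ [])).flatMap (fun s => s ++ [' ']) := by
  induction ts generalizing a with
  | nil => simp
  | cons hd tl ih =>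
    rw [List.foldl_cons, ih]
    by_cases h : hd = []
    · simp [h]
    · simp [h, List.filter_cons, List.append_assoc]

theorem pvDropLast_flatMap (ts : List (List Char)) :
    (ts.flatMap (fun s => s ++ [' '])).dropLast = pvJoin ts := by
  induction ts with
  | nil => simp [pvJoin]
  | cons h r ih =>
    cases r with
    | nil => simp [pvJoin, List.dropLast_concat]
    | cons h2 r2 =>
      have hne : (List.flatMap (fun s => s ++ [' ']) (h2 :: r2)) ≠ [] := by simp
      rw [List.flatMap_cons, List.dropLast_append_of_ne_nil hne, ih]
      simp [pvJoin, List.append_assoc]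

theorem pvCollapseA_eq (x : List Char) :
    pvCollapseA x = pvJ0 (pvSplit ' ' x) := by
  unfold pvCollapseA
  rw [pvSplitOn_single, pvFoldl_collapse]
  have h1 : PySem.List.slice
        ([] ++ ((pvSplit ' ' x).filter (· ≠ [])).flatMap (fun s => s ++ [' '])) none (some (-1))
      = (((pvSplit ' ' x).filter (· ≠ [])).flatMap (fun s => s ++ [' '])).dropLast := by
    simp [pysem]
  rw [h1, pvDropLast_flatMap]
  rfl

theorem pvSplit_snoc_space (x : List Char) :
    pvSplit ' ' (x ++ [' ']) = pvSplit ' ' x ++ [[]] := by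
  induction x with
  | nil => simp [pvSplit]
  | cons c t ih =>
    by_cases h : c = ' '
    · simp [pvSplit, h, ih]
    · cases hs : pvSplit ' ' t with
      | nil => exact absurd hs (pvSplit_ne_nil ' ' t)
      | cons a b => simp [pvSplit, h, ih, hs, List.modifyHead]

theorem pvSplit_replicate (n : Nat) (x : List Char) :
    pvSplit ' ' (x ++ List.replicate n ' ') = pvSplit ' ' x ++ List.replicate n [] := by
  induction n generalizing x with
  | zero => simp
  | succ m ih =>
    rw [List.replicate_succ]
    rw [show x ++ ' ' :: List.replicate m ' ' = (x ++ [' ']) ++ List.replicate m ' ' from by simp]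
    rw [ih (x ++ [' ']), pvSplit_snoc_space]
    simp [List.replicate_succ]

theorem pvJ0_spaces (ts : List (List Char)) (n : Nat) :
    pvJ0 (ts ++ List.replicate n []) = pvJ0 ts := by
  simp [pvJ0, List.filter_append, List.filter_replicate]

theorem pvPunctSet_eq : pvPunctSet = pvPunct := by decide

theorem pvFoldl1 (cs : List Char) (out : List Char) (need : Bool) (h : out ≠ []) :
    (List.foldl pvStepB (out, need) cs).1 = out ++ pvScan1 need cs := by
  induction cs generalizing out need with
  | nil => simp [pvScan1]
  | cons c t ih =>
    rw [List.foldl_cons]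
    by_cases hc : c = ' '
    · subst hc
      rw [show pvStepB (out, need) ' ' = (out, true) from by simp [pvStepB, h]]
      rw [ih out true h]
      simp [pvScan1]
    · have hie : out.isEmpty = false := by simpa [List.isEmpty_iff] using h
      have hstep : pvStepB (out, need) c
          = (out ++ (if need || pvPunctSet.contains c then [' ', c] else [c]), false) := by
        simp only [pvStepB, if_neg hc]
        cases need <;> by_cases hp : c ∈ pvPunctSet <;>
          simp [hp, hie, List.contains_eq_mem, List.append_assoc]
      rw [hstep, ih _ false (List.append_ne_nil_of_left_ne_nil h _)]
      rw [show pvScan1 need (c :: t)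
          = (if need || pvPunctSet.contains c then [' ', c] else [c]) ++ pvScan1 false t from
        by simp [pvScan1, hc]]
      simp [List.append_assoc]

theorem pvFoldl0 (cs : List Char) :
    (List.foldl pvStepB ([], false) cs).1 = pvScan0 cs := by
  induction cs with
  | nil => rfl
  | cons c t ih =>
    rw [List.foldl_cons]
    by_cases hc : c = ' '
    · subst hc
      rw [show pvStepB ([], false) ' ' = ([], false) from by simp [pvStepB]]
      rw [ih]
      simp [pvScan0]
    · rw [show pvStepB ([], false) c = ([c], false) from by simp [pvStepB, hc]]
      rw [pvFoldl1 t [c] false (by simp)]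
      simp [pvScan0, hc]

theorem pvTri (cs : List Char) :
    pvScan0 cs = pvJ0 (pvM cs) ∧ pvScan1 false cs = pvJc (pvM cs)
      ∧ pvScan1 true cs = pvJs (pvM cs) := by
  induction cs with
  | nil => exact ⟨rfl, rfl, rfl⟩
  | cons c t ih =>
    obtain ⟨ih0, ihc, ihs⟩ := ih
    cases hm : pvM t with
    | nil => exact absurd hm (pvSplit_ne_nil ' ' (pvIns pvPunct t))
    | cons h r =>
      rw [hm] at ih0 ihc ihs
      by_cases hsp : c = ' '
      · subst hsp
        have hM : pvM (' ' :: t) = [] :: (h :: r) := by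
          unfold pvM
          rw [show pvIns pvPunct (' ' :: t) = ' ' :: pvIns pvPunct t from by
            unfold pvIns; rw [List.flatMap_cons, if_neg (by decide)]; simp]
          rw [show pvSplit ' ' (' ' :: pvIns pvPunct t) = [] :: pvSplit ' ' (pvIns pvPunct t) from
            by simp [pvSplit]]
          rw [show pvSplit ' ' (pvIns pvPunct t) = h :: r from hm]
        rw [hM]
        refine ⟨?_, ?_, ?_⟩
        · rw [show pvScan0 (' ' :: t) = pvScan0 t from by simp [pvScan0], ih0]
          simp [pvJ0, List.filter_cons]
        · rw [show pvScan1 false (' ' :: t) = pvScan1 true t from by simp [pvScan1], ihs]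
          simp [pvJc, pvJs, List.filter_cons, List.append_assoc]
        · rw [show pvScan1 true (' ' :: t) = pvScan1 true t from by simp [pvScan1], ihs]
          simp [pvJs, List.filter_cons]
      · have hMgen : ∀ u : List Char,
            pvSplit ' ' (c :: u) = (pvSplit ' ' u).modifyHead (c :: ·) := by
          intro u; simp [pvSplit, hsp]
        by_cases hp : pvPunctSet.contains c = true
        · have hpc : pvPunct.contains c = true := by rw [← pvPunctSet_eq]; exact hp
          have hM : pvM (c :: t) = [] :: (c :: h) :: r := by
            unfold pvM
            rw [show pvIns pvPunct (c :: t) = ' ' :: c :: pvIns pvPunct t from by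
              unfold pvIns; rw [List.flatMap_cons, if_pos hpc]; simp]
            rw [show pvSplit ' ' (' ' :: c :: pvIns pvPunct t)
                = [] :: pvSplit ' ' (c :: pvIns pvPunct t) from by simp [pvSplit]]
            rw [hMgen, show pvSplit ' ' (pvIns pvPunct t) = h :: r from hm]
            rfl
          rw [hM]
          refine ⟨?_, ?_, ?_⟩
          · rw [show pvScan0 (c :: t) = c :: pvScan1 false t from by simp [pvScan0, hsp], ihc]
            simp [pvJ0, pvJc, pvJs, pvJoin, List.filter_cons, List.append_assoc]
          · have hp2 : c ∈ pvPunctSet := by simpa [List.contains_eq_mem] using hp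
            rw [show pvScan1 false (c :: t) = [' ', c] ++ pvScan1 false t from
              by simp [pvScan1, hsp, List.contains_eq_mem, hp2], ihc]
            simp [pvJc, pvJs, List.filter_cons, List.append_assoc]
          · rw [show pvScan1 true (c :: t) = [' ', c] ++ pvScan1 false t from
              by simp [pvScan1, hsp], ihc]
            simp [pvJc, pvJs, List.filter_cons, List.append_assoc]
        · have hpc : pvPunct.contains c = false := by rw [← pvPunctSet_eq]; simpa using hp
          have hM : pvM (c :: t) = (c :: h) :: r := by
            unfold pvM
            rw [show pvIns pvPunct (c :: t) = c :: pvIns pvPunct t from by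
              unfold pvIns; rw [List.flatMap_cons, if_neg (by simpa using hpc)]; simp]
            rw [hMgen, show pvSplit ' ' (pvIns pvPunct t) = h :: r from hm]
            rfl
          rw [hM]
          refine ⟨?_, ?_, ?_⟩
          · rw [show pvScan0 (c :: t) = c :: pvScan1 false t from by simp [pvScan0, hsp], ihc]
            simp [pvJ0, pvJc, pvJs, pvJoin, List.filter_cons, List.append_assoc]
          · have hp' : ¬ c ∈ pvPunctSet := by simpa [List.contains_eq_mem] using hp
            rw [show pvScan1 false (c :: t) = [c] ++ pvScan1 false t from
              by simp [pvScan1, hsp, List.contains_eq_mem, hp'], ihc]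
            simp [pvJc, pvJs, List.filter_cons, List.append_assoc]
          · rw [show pvScan1 true (c :: t) = [' ', c] ++ pvScan1 false t from
              by simp [pvScan1, hsp], ihc]
            simp [pvJc, pvJs, List.filter_cons, List.append_assoc]

-- ===== VERDICT (by name: the statement is the Claim_ definition above) =====
theorem formalize_spec : Claim_equal_formalize := by
  intro str1 _
  show String.mk (PySem.Chars.lower (pvCollapseA (List.foldl pvPassA str1.toList
      [[','], ['.'], ['?'], ['!'], [':'], ['"'], ['\''], ['/']])))
    = String.mk (PySem.Chars.lower (List.foldl pvStepB ([], false) str1.toList).1)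
  rw [pvLoop_eq, pvFoldl0, pvCollapseA_eq, pvSplit_replicate, pvJ0_spaces]
  have h := (pvTri str1.toList).1
  unfold pvM at h
  rw [← h]
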